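-- pv_equiv track=rewrite | github.com/Empiire00/advent-of-code-2022 | day-7/utils.py | get_command_pairs
-- ===== SOURCE A (Python) =====
-- def get_next_command(lines: list[str], start: int) -> int:
--     for i, line in enumerate(lines[start + 1:]):
--         if line.startswith('$'):
--             return i + start + 1
--     # no more commands found
--     return len(lines)
--
-- def get_command_pairs(lines: list[str]) -> list[(str, list[str])]:
--     commands = []
--     command_end = 0
--     while command_end < len(lines):
--         command_start = command_end
--         command_end = get_next_command(lines, command_start)
--         command = lines[command_start]
--         output = lines[command_start + 1:command_end]
--         commands.append((command, output))
--     return commands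
-- ===== SOURCE B (Python) =====
-- def get_command_pairs(lines: list[str]) -> list[(str, list[str])]:
--     if not lines:
--         return []
--     commands = []
--     cmd = lines[0]
--     out = []
--     for line in lines[1:]:
--         if line.startswith('$'):
--             commands.append((cmd, out))
--             cmd, out = line, []
--         else:
--             out.append(line)
--     commands.append((cmd, out))
--     return commands
-- ===== Notes on version B (the rewrite author's own statement) =====
-- stated objective: alternative
-- what changed: Replaces the while-loop that repeatedly slices the list and rescans it for the next '$' line with a single pass that accumulates the current command's output lines and starts a new pair at each '$' line.
import Mathlib
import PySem

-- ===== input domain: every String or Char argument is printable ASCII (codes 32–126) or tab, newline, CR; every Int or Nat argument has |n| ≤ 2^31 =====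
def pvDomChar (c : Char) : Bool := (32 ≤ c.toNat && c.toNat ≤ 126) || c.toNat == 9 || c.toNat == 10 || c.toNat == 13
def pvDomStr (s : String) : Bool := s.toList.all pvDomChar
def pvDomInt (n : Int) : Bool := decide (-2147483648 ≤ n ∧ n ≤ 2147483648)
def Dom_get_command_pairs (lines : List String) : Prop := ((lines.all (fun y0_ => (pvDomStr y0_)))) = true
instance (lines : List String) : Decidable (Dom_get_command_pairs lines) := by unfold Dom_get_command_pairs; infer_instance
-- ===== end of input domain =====

-- B replaces A's while-loop, which repeatedly slices the list and rescans it for the next '$'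
-- line, by a single pass that accumulates the current command's output lines (objective: alternative).

-- ===== PORT A =====
-- for i, line in enumerate(lines[start+1:]): if line.startswith('$'): return i+start+1; return len(lines)
def gncGo (start fallback : Int) : List (Int × String) → Int
  | [] => fallback
  | (i, line) :: rest =>
      if PySem.Str.startswith line "$" then i + start + 1 else gncGo start fallback rest

def get_next_command (lines : List String) (start : Int) : Int :=
  gncGo start (lines.length : Int) (PySem.List.enumerate (PySem.List.slice lines (some (start + 1)) none))

-- termination lemma for the while-loop port (cited in decreasing_by)
theorem gncGo_gt (start fallback : Int) (l : List (Int × String))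
    (hl : ∀ pr ∈ l, 0 ≤ pr.1) (hf : start < fallback) : start < gncGo start fallback l := by
  induction l with
  | nil => simpa [gncGo]
  | cons pr rest ih =>
      obtain ⟨i, line⟩ := pr
      have h0 : (0:Int) ≤ i := hl (i, line) (by simp)
      simp only [gncGo]
      split
      · omega
      · exact ih (fun q hq => hl q (by simp [hq]))

theorem get_next_command_gt (lines : List String) (start : Int)
    (h : start < (lines.length : Int)) : start < get_next_command lines start := by
  refine gncGo_gt _ _ _ ?_ h
  intro pr hpr
  rcases (PySem.List.mem_enumerate_iff _ _ _).1 hpr with ⟨k, hk, rfl⟩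
  simp

-- while command_end < len(lines): …
def gcpLoop (lines : List String) (commands : List (String × List String)) (command_end : Int) :
    List (String × List String) :=
  if h : command_end < (lines.length : Int) then
    -- command_start = command_end; command = lines[command_start] (always in range when started
    -- from 0, so the getD default is unreachable); output = lines[command_start+1:command_end']
    gcpLoop lines
      (commands ++ [((PySem.List.pyGet? lines command_end).getD "",
        PySem.List.slice lines (some (command_end + 1)) (some (get_next_command lines command_end)))])
      (get_next_command lines command_end)
  else commands
termination_by ((lines.length : Int) - command_end).toNat
decreasing_by
  have := get_next_command_gt lines command_end h
  omega

def get_command_pairs (lines : List String) : List (String × List String) :=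
  gcpLoop lines [] 0

-- ===== PORT B =====
def gcpAltLoop (commands : List (String × List String)) (cmd : String) (out : List String) :
    List String → List (String × List String)
  | [] => commands ++ [(cmd, out)]
  | l :: rest =>
      if PySem.Str.startswith l "$" then gcpAltLoop (commands ++ [(cmd, out)]) l [] rest
      else gcpAltLoop commands cmd (out ++ [l]) rest

def get_command_pairs_alt (lines : List String) : List (String × List String) :=
  match lines with
  | [] => []
  | first :: rest => gcpAltLoop [] first [] rest

-- ===== PRECONDITION & SPEC =====
def Spec_get_command_pairs (lines : List String) (out : List (String × List String)) : Prop := out = get_command_pairs_alt lines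
instance (lines : List String) (out : List (String × List String)) : Decidable (Spec_get_command_pairs lines out) := by unfold Spec_get_command_pairs; infer_instance

-- ===== CLAIM (what is proved, stated in full; the proofs are below) =====
def Claim_equal_get_command_pairs : Prop := ∀ (lines : List String), Dom_get_command_pairs lines → Spec_get_command_pairs lines (get_command_pairs lines)

-- ===== LEMMAS AND PROOFS =====

-- "is an output line" (not a command line)
def pvOut (l : String) : Bool := !PySem.Str.startswith l "$"

-- common characterisation of both programs: group a line list into (command, outputs) segments
def segTail : List String → List (String × List String)
  | [] => []
  | c :: ls => (c, ls.takeWhile pvOut) :: segTail (ls.dropWhile pvOut)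
termination_by l => l.length
decreasing_by
  have := List.length_dropWhile_le pvOut ls
  simp
  omega

theorem alt_loop_eq (rest : List String) : ∀ (commands : List (String × List String)) (cmd : String) (out : List String),
    gcpAltLoop commands cmd out rest =
      commands ++ (cmd, out ++ rest.takeWhile pvOut) :: segTail (rest.dropWhile pvOut) := by
  induction rest with
  | nil => intro commands cmd out; simp [gcpAltLoop, segTail]
  | cons l ls ih =>
      intro commands cmd out
      by_cases hb : PySem.Str.startswith l "$" = true
      · have hp : pvOut l = false := by simp only [pvOut, hb, Bool.not_true]
        rw [gcpAltLoop, if_pos hb, ih]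
        simp [List.takeWhile_cons, List.dropWhile_cons, hp, segTail]
      · have hp : pvOut l = true := by simp only [pvOut, eq_false_of_ne_true hb, Bool.not_false]
        rw [gcpAltLoop, if_neg hb, ih]
        simp [List.takeWhile_cons, List.dropWhile_cons, hp]

theorem alt_eq_segTail (lines : List String) : get_command_pairs_alt lines = segTail lines := by
  cases lines with
  | nil => simp [get_command_pairs_alt, segTail]
  | cons first rest =>
      rw [get_command_pairs_alt, alt_loop_eq, segTail]
      simp

theorem gncGo_enum (t : List String) : ∀ (s start fallback : Int),
    gncGo start fallback (PySem.List.enumerate t s) =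
      if t.dropWhile pvOut = [] then fallback
      else s + ((t.takeWhile pvOut).length : Int) + start + 1 := by
  induction t with
  | nil => intro s start fallback; simp [PySem.List.enumerate_nil, gncGo]
  | cons l ls ih =>
      intro s start fallback
      rw [PySem.List.enumerate_cons, gncGo]
      by_cases hb : PySem.Str.startswith l "$" = true
      · have hp : pvOut l = false := by simp only [pvOut, hb, Bool.not_true]
        rw [if_pos hb]
        simp [List.dropWhile_cons, List.takeWhile_cons, hp]
      · have hp : pvOut l = true := by simp only [pvOut, eq_false_of_ne_true hb, Bool.not_false]
        rw [if_neg hb, ih]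
        simp only [List.dropWhile_cons, List.takeWhile_cons, hp, if_pos, List.length_cons, ite_true]
        split <;> push_cast <;> ring

theorem gnc_eq (lines : List String) (k : Nat) (hk : k < lines.length) :
    get_next_command lines (k : Int) =
      ((k + 1 + ((lines.drop (k + 1)).takeWhile pvOut).length : Nat) : Int) := by
  rw [get_next_command]
  have hslice : PySem.List.slice lines (some ((k : Int) + 1)) none = lines.drop (k + 1) := by
    have : ((k : Int) + 1) = ((k + 1 : Nat) : Int) := by push_cast; ring
    rw [this, PySem.List.slice_from_natCast]
  rw [hslice, gncGo_enum]
  by_cases h : (lines.drop (k + 1)).dropWhile pvOut = []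
  · -- no further '$': takeWhile is the whole suffix
    rw [if_pos h]
    have htw : (lines.drop (k + 1)).takeWhile pvOut = lines.drop (k + 1) := by
      have h2 := List.takeWhile_append_dropWhile (p := pvOut) (l := lines.drop (k + 1))
      rw [h] at h2; simpa using h2
    rw [htw]
    have hlen : (lines.drop (k + 1)).length = lines.length - (k + 1) := by simp
    omega
  · rw [if_neg h]; push_cast; ring

theorem dropWhile_eq_drop_len (t : List String) :
    t.dropWhile pvOut = t.drop (t.takeWhile pvOut).length := by
  have h := List.takeWhile_append_dropWhile (p := pvOut) (l := t)
  calc t.dropWhile pvOut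
      = ((t.takeWhile pvOut) ++ t.dropWhile pvOut).drop (t.takeWhile pvOut).length := by
        rw [List.drop_left]
    _ = t.drop (t.takeWhile pvOut).length := by rw [h]

theorem takeWhile_eq_take_len (t : List String) :
    t.takeWhile pvOut = t.take (t.takeWhile pvOut).length := by
  have h := List.takeWhile_prefix (l := t) (p := pvOut)
  exact (List.prefix_iff_eq_take.1 h)

theorem loop_seg (m : Nat) : ∀ (lines : List String) (k : Nat) (commands : List (String × List String)),
    k < lines.length → lines.length - k ≤ m →
    gcpLoop lines commands (k : Int) = commands ++ segTail (lines.drop k) := by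
  induction m with
  | zero => intro lines k commands hk hm; omega
  | succ m ih =>
      intro lines k commands hk hm
      have hkz : (k : Int) < (lines.length : Int) := by exact_mod_cast hk
      rw [gcpLoop, dif_pos hkz, gnc_eq lines k hk]
      set t := lines.drop (k + 1) with ht
      set e : Nat := k + 1 + (t.takeWhile pvOut).length with he
      have hcmd : (PySem.List.pyGet? lines (k : Int)).getD "" = lines[k] := by
        simp [PySem.List.pyGet?_natCast, List.getElem?_eq_getElem hk]
      have hslice : PySem.List.slice lines (some ((k : Int) + 1)) (some (e : Int)) = t.takeWhile pvOut := by
        have h1 : ((k : Int) + 1) = ((k + 1 : Nat) : Int) := by push_cast; ring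
        rw [h1, PySem.List.slice_natCast, ← ht]
        have h2 : e - (k + 1) = (t.takeWhile pvOut).length := by omega
        rw [h2, ← takeWhile_eq_take_len]
      have hdropk : lines.drop k = lines[k] :: t := by
        rw [ht]; exact List.drop_eq_getElem_cons hk
      have hdrope : lines.drop e = t.dropWhile pvOut := by
        rw [dropWhile_eq_drop_len, ht, List.drop_drop]
      have hseg : segTail (lines.drop k) = (lines[k], t.takeWhile pvOut) :: segTail (lines.drop e) := by
        simp only [hdropk, segTail, hdrope]
      simp only [hcmd, hslice]
      by_cases hel : e < lines.length
      · rw [ih lines e (commands ++ [(lines[k], t.takeWhile pvOut)]) hel (by omega), hseg]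
        simp
      · rw [gcpLoop, dif_neg (by exact_mod_cast hel), hseg]
        have : lines.drop e = [] := List.drop_eq_nil_of_le (by omega)
        rw [this, segTail]

-- ===== VERDICT (by name: the statement is the Claim_ definition above) =====
theorem get_command_pairs_spec : Claim_equal_get_command_pairs := by
  intro lines _
  unfold Spec_get_command_pairs get_command_pairs
  rw [alt_eq_segTail]
  cases lines with
  | nil => rw [gcpLoop]; simp [segTail]
  | cons first rest =>
      have h := loop_seg (first :: rest).length (first :: rest) 0 [] (by simp) (by omega)
      simpa using h
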